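-- pv_equiv track=rewrite | github.com/calebrob6/labeling-tool | server.py | filter_fns
-- ===== SOURCE A (Python) =====
-- def filter_fns(fns):
--     for fn in fns:
--         if "/ny/" in fn and "/2017/" in fn:
--             return fn
--         elif "/pa/" in fn and "/2017/" in fn:
--             return fn
--         elif "/de/" in fn and "/2018/" in fn:
--             return fn
--         elif "/md/" in fn and "/2018/" in fn:
--             return fn
--         elif "/va/" in fn and "/2018/" in fn:
--             return fn
--         elif "/wv/" in fn and "/2018/" in fn:
--             return fn
--     raise ValueError("No valid fn found: " + str(fns))
-- ===== SOURCE B (Python) =====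
-- CRITERIA = [("/ny/", "/2017/"), ("/pa/", "/2017/"), ("/de/", "/2018/"),
--             ("/md/", "/2018/"), ("/va/", "/2018/"), ("/wv/", "/2018/")]
--
-- def _first_idx(fns, st, yr):
--     for i, fn in enumerate(fns):
--         if st in fn and yr in fn:
--             return i
--     return None
--
-- def filter_fns(fns):
--     idxs = [i for i in (_first_idx(fns, st, yr) for st, yr in CRITERIA) if i is not None]
--     if not idxs:
--         raise ValueError("No valid fn found: " + str(fns))
--     return fns[min(idxs)]
-- ===== Notes on version B (the rewrite author's own statement) =====
-- stated objective: alternative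
-- what changed: Instead of one scan with a six-way elif chain per element, B runs one staged pass per criterion computing the first matching index for that criterion, then returns the element at the minimum of those indices.
import Mathlib
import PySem

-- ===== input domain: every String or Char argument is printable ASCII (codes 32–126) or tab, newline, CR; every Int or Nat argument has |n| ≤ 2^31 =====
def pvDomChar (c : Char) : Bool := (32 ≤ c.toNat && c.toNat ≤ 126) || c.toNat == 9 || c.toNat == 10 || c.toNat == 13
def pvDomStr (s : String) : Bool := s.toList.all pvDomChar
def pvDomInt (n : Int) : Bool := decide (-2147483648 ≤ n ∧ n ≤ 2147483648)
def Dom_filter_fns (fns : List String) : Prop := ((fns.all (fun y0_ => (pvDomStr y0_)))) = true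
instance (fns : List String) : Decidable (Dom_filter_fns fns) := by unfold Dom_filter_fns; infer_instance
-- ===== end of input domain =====

-- B replaces A's single scan with a six-way elif chain by one staged pass per
-- criterion (first matching index each) and returns the element at the minimum
-- index (objective: alternative, same cost). Return value only: on no match
-- both Pythons raise the same ValueError; Pre_ excludes those inputs.

-- ===== PORT A =====
-- literal transliteration of A's for-loop with its six-way elif chain
def filter_fns (fns : List String) : String :=
  match fns with
  | [] => ""   -- Python raises ValueError here; excluded by Pre_filter_fns
  | fn :: rest =>
    if PySem.Str.isIn "/ny/" fn && PySem.Str.isIn "/2017/" fn then fn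
    else if PySem.Str.isIn "/pa/" fn && PySem.Str.isIn "/2017/" fn then fn
    else if PySem.Str.isIn "/de/" fn && PySem.Str.isIn "/2018/" fn then fn
    else if PySem.Str.isIn "/md/" fn && PySem.Str.isIn "/2018/" fn then fn
    else if PySem.Str.isIn "/va/" fn && PySem.Str.isIn "/2018/" fn then fn
    else if PySem.Str.isIn "/wv/" fn && PySem.Str.isIn "/2018/" fn then fn
    else filter_fns rest

-- ===== PORT B =====
-- CRITERIA table of Source B
def pvCriteria : List (String × String) :=
  [("/ny/", "/2017/"), ("/pa/", "/2017/"), ("/de/", "/2018/"),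
   ("/md/", "/2018/"), ("/va/", "/2018/"), ("/wv/", "/2018/")]

-- _first_idx of Source B: enumerate loop returning the first matching index (indices are ℕ)
def pvFirstIdx (st yr : String) : List String → Nat → Option Nat
  | [], _ => none
  | fn :: rest, i =>
    if PySem.Str.isIn st fn && PySem.Str.isIn yr fn then some i
    else pvFirstIdx st yr rest (i + 1)

-- idxs list comprehension of Source B
def pvIdxs (fns : List String) : List Nat :=
  pvCriteria.filterMap (fun p => pvFirstIdx p.1 p.2 fns 0)

-- min(idxs) + fns[...]; empty idxs = Python's ValueError, excluded by Pre_filter_fns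
def filter_fns_alt (fns : List String) : String :=
  match pvIdxs fns with
  | [] => ""
  | i :: r => (PySem.List.pyGet? fns (↑(r.foldl min i))).getD ""

-- ===== PRECONDITION & SPEC =====
-- Exactly the inputs on which A returns: some element contains a matching
-- state/year substring pair; on all others A raises ValueError (so does B).
def Pre_filter_fns (fns : List String) : Prop :=
  ∃ fn ∈ fns,
    ((PySem.Str.isIn "/ny/" fn && PySem.Str.isIn "/2017/" fn)
     || (PySem.Str.isIn "/pa/" fn && PySem.Str.isIn "/2017/" fn)
     || (PySem.Str.isIn "/de/" fn && PySem.Str.isIn "/2018/" fn)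
     || (PySem.Str.isIn "/md/" fn && PySem.Str.isIn "/2018/" fn)
     || (PySem.Str.isIn "/va/" fn && PySem.Str.isIn "/2018/" fn)
     || (PySem.Str.isIn "/wv/" fn && PySem.Str.isIn "/2018/" fn)) = true
instance (fns : List String) : Decidable (Pre_filter_fns fns) := by unfold Pre_filter_fns; infer_instance

def pvWitness_filter_fns : List String := ["a/ny/2017/b"]

def Spec_filter_fns (fns : List String) (out : String) : Prop := out = filter_fns_alt fns
instance (fns : List String) (out : String) : Decidable (Spec_filter_fns fns out) := by unfold Spec_filter_fns; infer_instance

-- ===== CLAIM =====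
def Claim_equal_filter_fns : Prop := ∀ (fns : List String), Dom_filter_fns fns → Pre_filter_fns fns → Spec_filter_fns fns (filter_fns fns)

-- ===== LEMMAS AND PROOFS =====

-- the chain condition A tests on one element, as a function of it
def pvChain (fn : String) : Bool :=
  (PySem.Str.isIn "/ny/" fn && PySem.Str.isIn "/2017/" fn)
  || (PySem.Str.isIn "/pa/" fn && PySem.Str.isIn "/2017/" fn)
  || (PySem.Str.isIn "/de/" fn && PySem.Str.isIn "/2018/" fn)
  || (PySem.Str.isIn "/md/" fn && PySem.Str.isIn "/2018/" fn)
  || (PySem.Str.isIn "/va/" fn && PySem.Str.isIn "/2018/" fn)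
  || (PySem.Str.isIn "/wv/" fn && PySem.Str.isIn "/2018/" fn)

theorem any_eq_chain (fn : String) :
    pvCriteria.any (fun p => PySem.Str.isIn p.1 fn && PySem.Str.isIn p.2 fn) = pvChain fn := by
  simp [pvCriteria, pvChain, Bool.or_assoc]

-- min of a possibly empty index list
def pvMinO : List Nat → Option Nat
  | [] => none
  | i :: r => some (r.foldl min i)

def pvOMin : Option Nat → Option Nat → Option Nat
  | none, o => o
  | some a, none => some a
  | some a, some b => some (min a b)

theorem foldl_min_init (l : List Nat) : ∀ a b, l.foldl min (min a b) = min a (l.foldl min b) := by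
  induction l with
  | nil => intro a b; rfl
  | cons c l ih =>
    intro a b
    simp only [List.foldl]
    rw [Nat.min_assoc, ih]

theorem pvMinO_toList_append (o : Option Nat) (l : List Nat) :
    pvMinO (o.toList ++ l) = pvOMin o (pvMinO l) := by
  cases o with
  | none => rfl
  | some a =>
    cases l with
    | nil => rfl
    | cons b r =>
      simp only [Option.toList, List.cons_append, List.nil_append, pvMinO, pvOMin, List.foldl]
      rw [foldl_min_init]

theorem pvOMin_map_succ (o1 o2 : Option Nat) :
    pvOMin (o1.map (· + 1)) (o2.map (· + 1)) = (pvOMin o1 o2).map (· + 1) := by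
  cases o1 <;> cases o2 <;> simp [pvOMin]

theorem pvFirstIdx_shift (st yr : String) (fns : List String) :
    ∀ i, pvFirstIdx st yr fns i = (pvFirstIdx st yr fns 0).map (· + i) := by
  induction fns with
  | nil => intro i; rfl
  | cons fn rest ih =>
    intro i
    simp only [pvFirstIdx]
    split
    · simp
    · rw [ih (i + 1), ih 1, Option.map_map]
      congr 1; funext x; simp [Function.comp]; omega

theorem pvFirstIdx_cons (st yr : String) (fn : String) (rest : List String) :
    pvFirstIdx st yr (fn :: rest) 0 =
      if (PySem.Str.isIn st fn && PySem.Str.isIn yr fn) then some 0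
      else (pvFirstIdx st yr rest 0).map (· + 1) := by
  simp only [pvFirstIdx]
  split
  · rfl
  · exact pvFirstIdx_shift st yr rest 1

theorem filterMap_cons_toList (f : String × String → Option Nat) (p : String × String)
    (l : List (String × String)) :
    List.filterMap f (p :: l) = (f p).toList ++ List.filterMap f l := by
  cases h : f p <;> simp [h]

-- generalized over the criteria list: structure of the min index on a cons
theorem pvKey (cs : List (String × String)) (fn : String) (rest : List String) :
    pvMinO (cs.filterMap (fun p => pvFirstIdx p.1 p.2 (fn :: rest) 0)) =
      if cs.any (fun p => PySem.Str.isIn p.1 fn && PySem.Str.isIn p.2 fn)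
      then some 0
      else (pvMinO (cs.filterMap (fun p => pvFirstIdx p.1 p.2 rest 0))).map (· + 1) := by
  induction cs with
  | nil => rfl
  | cons p cs ih =>
    rw [filterMap_cons_toList, filterMap_cons_toList, pvMinO_toList_append,
        pvMinO_toList_append, pvFirstIdx_cons, ih, List.any_cons]
    cases hp : (PySem.Str.isIn p.1 fn && PySem.Str.isIn p.2 fn) <;>
      cases hc : cs.any (fun p => PySem.Str.isIn p.1 fn && PySem.Str.isIn p.2 fn) <;>
        simp only [Bool.false_or, Bool.true_or, if_true, if_false, Bool.false_eq_true]
    · exact pvOMin_map_succ _ _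
    · cases pvFirstIdx p.1 p.2 rest 0 <;> simp [pvOMin]
    · cases pvMinO (cs.filterMap (fun p => pvFirstIdx p.1 p.2 rest 0)) <;> simp [pvOMin]
    · simp [pvOMin]

-- a match anywhere yields a nonempty index list
theorem pvMinO_ne_none (fns : List String) (h : ∃ fn ∈ fns, pvChain fn = true) :
    pvMinO (pvIdxs fns) ≠ none := by
  induction fns with
  | nil => obtain ⟨fn, hm, _⟩ := h; cases hm
  | cons fn rest ih =>
    unfold pvIdxs
    rw [pvKey pvCriteria fn rest, any_eq_chain]
    cases hfn : pvChain fn with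
    | true => simp
    | false =>
      have hrest : ∃ g ∈ rest, pvChain g = true := by
        obtain ⟨g, hg, hgm⟩ := h
        rcases List.mem_cons.mp hg with rfl | hg'
        · rw [hfn] at hgm; cases hgm
        · exact ⟨g, hg', hgm⟩
      have hne := ih hrest
      unfold pvIdxs at hne
      simp only [Bool.false_eq_true, if_false]
      cases hmo : pvMinO (pvCriteria.filterMap (fun p => pvFirstIdx p.1 p.2 rest 0)) with
      | none => exact absurd hmo hne
      | some i => simp

-- B rephrased through pvMinO
theorem filter_fns_alt_eq_minO (fns : List String) :
    filter_fns_alt fns = match pvMinO (pvIdxs fns) with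
      | none => ""
      | some i => (PySem.List.pyGet? fns (↑i)).getD "" := by
  unfold filter_fns_alt
  cases h : pvIdxs fns <;> simp [pvMinO]

theorem ite_chain (b1 b2 b3 b4 b5 b6 b7 b8 : Bool) (x y : String) :
    (if b1 && b7 then x else if b2 && b7 then x else if b3 && b8 then x
     else if b4 && b8 then x else if b5 && b8 then x else if b6 && b8 then x else y) =
    (if (b1 && b7 || b2 && b7 || b3 && b8 || b4 && b8 || b5 && b8 || b6 && b8) then x else y) := by
  cases b1 <;> cases b2 <;> cases b3 <;> cases b4 <;> cases b5 <;> cases b6 <;>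
    cases b7 <;> cases b8 <;> rfl

theorem chainA_true (fn : String) (rest : List String) (h : pvChain fn = true) :
    filter_fns (fn :: rest) = fn := by
  have he : filter_fns (fn :: rest) = (if pvChain fn then fn else filter_fns rest) := by
    rw [pvChain]
    exact ite_chain _ _ _ _ _ _ _ _ fn (filter_fns rest)
  rw [he, h, if_pos rfl]

theorem chainA_false (fn : String) (rest : List String) (h : pvChain fn = false) :
    filter_fns (fn :: rest) = filter_fns rest := by
  have he : filter_fns (fn :: rest) = (if pvChain fn then fn else filter_fns rest) := by
    rw [pvChain]
    exact ite_chain _ _ _ _ _ _ _ _ fn (filter_fns rest)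
  rw [he, h]
  simp

set_option maxHeartbeats 1000000 in
theorem filter_fns_eq_alt (fns : List String) (h : Pre_filter_fns fns) :
    filter_fns fns = filter_fns_alt fns := by
  have hpre : ∃ fn ∈ fns, pvChain fn = true := h
  clear h
  induction fns with
  | nil => obtain ⟨fn, hm, _⟩ := hpre; cases hm
  | cons fn rest ih =>
    rw [filter_fns_alt_eq_minO]
    unfold pvIdxs
    rw [pvKey pvCriteria fn rest, any_eq_chain]
    cases hfn : pvChain fn with
    | true =>
      have hA : filter_fns (fn :: rest) = fn := chainA_true fn rest hfn
      simp only [if_true]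
      rw [hA]
      simp
    | false =>
      have hrest : ∃ g ∈ rest, pvChain g = true := by
        obtain ⟨g, hg, hgm⟩ := hpre
        rcases List.mem_cons.mp hg with rfl | hg'
        · rw [hfn] at hgm; cases hgm
        · exact ⟨g, hg', hgm⟩
      have hA : filter_fns (fn :: rest) = filter_fns rest := chainA_false fn rest hfn
      rw [hA, ih hrest, filter_fns_alt_eq_minO]
      unfold pvIdxs
      simp only [Bool.false_eq_true, if_false]
      cases hmo : pvMinO (pvCriteria.filterMap (fun p => pvFirstIdx p.1 p.2 rest 0)) with
      | none => exact absurd hmo (pvMinO_ne_none rest hrest)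
      | some i =>
        simp only [Option.map]
        have hget : PySem.List.pyGet? (fn :: rest) (↑(i + 1)) = PySem.List.pyGet? rest (↑i) := by
          simp
        rw [hget]

-- ===== VERDICT =====
theorem filter_fns_spec : Claim_equal_filter_fns := by
  intro fns _ hpre
  exact filter_fns_eq_alt fns hpre
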